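-- pv_equiv track=rewrite | github.com/NotmPlatform/test | bot.py | compute_category_scores
-- ===== SOURCE A (Python) =====
-- from typing import Dict, List, Tuple, Optional
--
-- def compute_category_scores(question_set: List[dict], history: List[str]) -> Dict[str, Dict[str, int]]:
--     category_scores = {
--         "psychology": {"A": 0, "B": 0, "C": 0},
--         "thinking": {"A": 0, "B": 0, "C": 0},
--         "practice": {"A": 0, "B": 0, "C": 0},
--     }
--
--     for idx, answer_code in enumerate(history):
--         if idx >= len(question_set):
--             break
--         category = question_set[idx].get("category", "practice")
--         if category not in category_scores:
--             category = "practice"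
--         if answer_code in category_scores[category]:
--             category_scores[category][answer_code] += 1
--
--     return category_scores
-- ===== SOURCE B (Python) =====
-- def compute_category_scores(question_set, history):
--     valid = ("psychology", "thinking", "practice")
--
--     def norm(q):
--         c = q.get("category", "practice")
--         return c if c in valid else "practice"
--
--     n = min(len(question_set), len(history))
--     # no running tally at all: each of the nine cells is computed by its own
--     # independent scan over the index range shared by both sequences
--     return {cat: {code: sum(1 for i in range(n)
--                             if norm(question_set[i]) == cat and history[i] == code)
--                   for code in "ABC"}
--             for cat in valid}
-- ===== Notes on version B (the rewrite author's own statement) =====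
-- stated objective: alternative
-- what changed: A makes one pass mutating a nested dict accumulator; B keeps no running state at all and computes each of the nine (category, code) cells by its own independent counting scan over the shared index range min(len(question_set), len(history)).
import Mathlib
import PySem

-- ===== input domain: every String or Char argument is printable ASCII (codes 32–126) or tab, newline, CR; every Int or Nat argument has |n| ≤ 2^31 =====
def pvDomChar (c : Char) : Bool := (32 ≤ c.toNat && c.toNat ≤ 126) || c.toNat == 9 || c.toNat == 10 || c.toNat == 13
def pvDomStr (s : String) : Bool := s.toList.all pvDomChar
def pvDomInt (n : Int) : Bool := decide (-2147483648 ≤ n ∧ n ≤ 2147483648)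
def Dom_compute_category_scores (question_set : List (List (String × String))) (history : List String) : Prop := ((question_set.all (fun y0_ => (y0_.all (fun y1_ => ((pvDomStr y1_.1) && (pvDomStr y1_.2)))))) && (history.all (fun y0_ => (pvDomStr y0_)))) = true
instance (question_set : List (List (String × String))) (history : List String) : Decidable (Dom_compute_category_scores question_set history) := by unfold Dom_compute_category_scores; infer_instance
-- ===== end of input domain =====

-- B keeps no running accumulator: each of the nine cells is recomputed by its own
-- independent counting scan over the shared index range (objective: alternative).

-- ===== PORT A =====
def pvInitScores : PySem.Dict String (PySem.Dict String Int) :=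
  PySem.Dict.mk
    [ ("psychology", PySem.Dict.mk [("A", 0), ("B", 0), ("C", 0)])
    , ("thinking",   PySem.Dict.mk [("A", 0), ("B", 0), ("C", 0)])
    , ("practice",   PySem.Dict.mk [("A", 0), ("B", 0), ("C", 0)]) ]

-- one iteration of A's for-loop body (after the break guard)
def pvStepA (q : List (String × String)) (answer_code : String)
    (cs : PySem.Dict String (PySem.Dict String Int)) :
    PySem.Dict String (PySem.Dict String Int) :=
  let category := (PySem.Dict.mk q).getD "category" "practice"
  let category := if cs.contains category then category else "practice"
  if (cs.getD category PySem.Dict.empty).contains answer_code then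
    cs.modify category PySem.Dict.empty (fun inner => inner.modify answer_code 0 (· + 1))
  else cs

-- A's loop: enumerate(history) with 'break' once idx reaches len(question_set)
def pvLoopA (question_set : List (List (String × String))) :
    Nat → List String → PySem.Dict String (PySem.Dict String Int) →
    PySem.Dict String (PySem.Dict String Int)
  | _, [], cs => cs
  | idx, answer_code :: rest, cs =>
    if idx ≥ question_set.length then cs
    else
      -- question_set[idx]: the guard ensures 0 ≤ idx < len, so getElem? is exact here
      pvLoopA question_set (idx + 1) rest
        (pvStepA ((question_set[idx]?).getD []) answer_code cs)

def compute_category_scores (question_set : List (List (String × String))) (history : List String) : List (String × List (String × Int)) :=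
  ((pvLoopA question_set 0 history pvInitScores).items).map (fun p => (p.1, p.2.items))

-- ===== PORT B =====
-- norm(q): the category, forced to "practice" when not one of the three valid keys
def pvNormB (q : List (String × String)) : String :=
  let c := (PySem.Dict.mk q).getD "category" "practice"
  if c ∈ ["psychology", "thinking", "practice"] then c else "practice"

-- sum(1 for i in range(n) if norm(question_set[i]) == cat and history[i] == code)
-- (the generator-sum is ported as a sum of 1/0 over the same index range; exact,
--  since indices i < n are in range for both sequences)
def pvCellScan (question_set : List (List (String × String))) (history : List String)
    (cat code : String) : Int :=
  let n := min question_set.length history.length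
  ((List.range n).map (fun i =>
    if pvNormB ((question_set[i]?).getD []) = cat ∧ (history[i]?).getD "" = code
    then (1 : Int) else 0)).sum

def compute_category_scores_alt (question_set : List (List (String × String))) (history : List String) : List (String × List (String × Int)) :=
  ["psychology", "thinking", "practice"].map (fun cat =>
    (cat, ["A", "B", "C"].map (fun code => (code, pvCellScan question_set history cat code))))

-- ===== PRECONDITION & SPEC =====
def Spec_compute_category_scores (question_set : List (List (String × String))) (history : List String) (out : List (String × List (String × Int))) : Prop := out = compute_category_scores_alt question_set history
instance (question_set : List (List (String × String))) (history : List String) (out : List (String × List (String × Int))) : Decidable (Spec_compute_category_scores question_set history out) := by unfold Spec_compute_category_scores; infer_instance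

-- ===== CLAIM (what is proved, stated in full; the proofs are below) =====
def Claim_equal_compute_category_scores : Prop := ∀ (question_set : List (List (String × String))) (history : List String), Dom_compute_category_scores question_set history → Spec_compute_category_scores question_set history (compute_category_scores question_set history)

-- ===== LEMMAS AND PROOFS =====

-- pvNorm: normalized (category, code) of one zipped pair, used to characterise A
def pvNorm (p : List (String × String) × String) : String × String :=
  (pvNormB p.1, p.2)

-- A's state is always the fixed 3x3 table with nine integer cells
def pvMkS (pa pb pc ta tb tc ra rb rc : Int) : PySem.Dict String (PySem.Dict String Int) :=
  PySem.Dict.mk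
    [ ("psychology", PySem.Dict.mk [("A", pa), ("B", pb), ("C", pc)])
    , ("thinking",   PySem.Dict.mk [("A", ta), ("B", tb), ("C", tc)])
    , ("practice",   PySem.Dict.mk [("A", ra), ("B", rb), ("C", rc)]) ]

def pvCell (p : String × String) (cat code : String) : Int :=
  if p = (cat, code) then 1 else 0

theorem pvStepA_mk (q : List (String × String)) (code : String)
    (pa pb pc ta tb tc ra rb rc : Int) :
    pvStepA q code (pvMkS pa pb pc ta tb tc ra rb rc) =
      pvMkS (pa + pvCell (pvNorm (q, code)) "psychology" "A")
            (pb + pvCell (pvNorm (q, code)) "psychology" "B")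
            (pc + pvCell (pvNorm (q, code)) "psychology" "C")
            (ta + pvCell (pvNorm (q, code)) "thinking" "A")
            (tb + pvCell (pvNorm (q, code)) "thinking" "B")
            (tc + pvCell (pvNorm (q, code)) "thinking" "C")
            (ra + pvCell (pvNorm (q, code)) "practice" "A")
            (rb + pvCell (pvNorm (q, code)) "practice" "B")
            (rc + pvCell (pvNorm (q, code)) "practice" "C") := by
  unfold pvStepA pvNorm pvNormB
  generalize (PySem.Dict.mk q).getD "category" "practice" = cat
  by_cases h1 : cat = "psychology" <;>
  by_cases h2 : cat = "thinking" <;>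
  by_cases h3 : cat = "practice" <;>
  by_cases c1 : code = "A" <;> by_cases c2 : code = "B" <;> by_cases c3 : code = "C" <;>
  simp_all [pvMkS, pvCell, PySem.Dict.modify, PySem.Dict.getD,
    PySem.Dict.get?, PySem.Dict.insert, PySem.Dict.empty, PySem.Dict.contains,
    Ne.symm, Prod.ext_iff]

theorem pvCount_step (p : List (String × String) × String)
    (ps : List (List (String × String) × String)) (c k : String) (n : Int) :
    n + pvCell (pvNorm (p.1, p.2)) c k + ((ps.map pvNorm).count (c, k) : Int)
      = n + (((p :: ps).map pvNorm).count (c, k) : Int) := by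
  by_cases h : pvNorm p = (c, k) <;> simp [pvCell, h] <;> omega

theorem pvFold_mk (ps : List (List (String × String) × String))
    (pa pb pc ta tb tc ra rb rc : Int) :
    ps.foldl (fun cs p => pvStepA p.1 p.2 cs) (pvMkS pa pb pc ta tb tc ra rb rc) =
      pvMkS (pa + ((ps.map pvNorm).count ("psychology", "A") : Int))
            (pb + ((ps.map pvNorm).count ("psychology", "B") : Int))
            (pc + ((ps.map pvNorm).count ("psychology", "C") : Int))
            (ta + ((ps.map pvNorm).count ("thinking", "A") : Int))
            (tb + ((ps.map pvNorm).count ("thinking", "B") : Int))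
            (tc + ((ps.map pvNorm).count ("thinking", "C") : Int))
            (ra + ((ps.map pvNorm).count ("practice", "A") : Int))
            (rb + ((ps.map pvNorm).count ("practice", "B") : Int))
            (rc + ((ps.map pvNorm).count ("practice", "C") : Int)) := by
  induction ps generalizing pa pb pc ta tb tc ra rb rc with
  | nil => simp
  | cons p ps ih =>
    simp only [List.foldl_cons]
    rw [pvStepA_mk, ih]
    simp only [pvCount_step]

theorem pvLoopA_eq_fold (question_set : List (List (String × String)))
    (codes : List String) (idx : Nat)
    (cs : PySem.Dict String (PySem.Dict String Int)) :
    pvLoopA question_set idx codes cs =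
      ((question_set.drop idx).zip codes).foldl (fun cs p => pvStepA p.1 p.2 cs) cs := by
  induction codes generalizing idx cs with
  | nil => simp [pvLoopA]
  | cons code rest ih =>
    rw [pvLoopA]
    by_cases h : idx ≥ question_set.length
    · rw [if_pos h, List.drop_eq_nil_of_le h]
      simp
    · push_neg at h
      rw [if_neg (by omega), ih,
        List.drop_eq_getElem_cons h, List.zip_cons_cons, List.foldl_cons]
      simp [List.getElem?_eq_getElem h]

-- the index-range traversal over min-of-lengths visits exactly the zipped pairs
theorem pvRangeMap_eq_zipMap (g : List (String × String) → String → Int) :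
    ∀ (qs : List (List (String × String))) (hs : List String),
      (List.range (min qs.length hs.length)).map
        (fun i => g ((qs[i]?).getD []) ((hs[i]?).getD ""))
      = (qs.zip hs).map (fun p => g p.1 p.2)
  | [], hs => by simp
  | q :: qs, [] => by simp
  | q :: qs, h :: hs => by
    rw [List.length_cons, List.length_cons, Nat.succ_min_succ, List.range_succ_eq_map,
      List.map_cons, List.map_map, List.zip_cons_cons, List.map_cons]
    refine congrArg₂ _ rfl ?_
    rw [← pvRangeMap_eq_zipMap g qs hs]
    rfl

-- summing the 0/1 indicator over a list counts the matching normalised pairs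
theorem pvSum_indicator_eq_count (cat code : String) :
    ∀ (l : List (List (String × String) × String)),
      (l.map (fun p => if pvNormB p.1 = cat ∧ p.2 = code then (1 : Int) else 0)).sum
        = ((l.map pvNorm).count (cat, code) : Int)
  | [] => by simp
  | p :: l => by
    rw [List.map_cons, List.sum_cons, List.map_cons, List.count_cons,
      pvSum_indicator_eq_count cat code l]
    by_cases hp : pvNorm p = (cat, code)
    · have h1 : pvNormB p.1 = cat := congrArg Prod.fst hp
      have h2 : p.2 = code := congrArg Prod.snd hp
      simp [h1, h2, hp]
      omega
    · have hc : ¬ (pvNormB p.1 = cat ∧ p.2 = code) := by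
        intro ⟨a, b⟩; exact hp (by simp [pvNorm, a, b])
      simp [hc, hp]

-- B's index-range scan for one cell equals the count of (cat, code) in the
-- normalised zip that characterises A's fold
theorem pvCellScan_eq_count (qs : List (List (String × String))) (hs : List String)
    (cat code : String) :
    pvCellScan qs hs cat code = (((qs.zip hs).map pvNorm).count (cat, code) : Int) := by
  simp only [pvCellScan]
  rw [pvRangeMap_eq_zipMap (fun q h => if pvNormB q = cat ∧ h = code then (1 : Int) else 0)
    qs hs]
  exact pvSum_indicator_eq_count cat code (qs.zip hs)

-- ===== VERDICT (by name: the statement is the Claim_ definition above) =====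
theorem compute_category_scores_spec : Claim_equal_compute_category_scores := by
  intro question_set history _
  unfold Spec_compute_category_scores
  show compute_category_scores question_set history = _
  have hinit : pvInitScores = pvMkS 0 0 0 0 0 0 0 0 0 := rfl
  rw [compute_category_scores, hinit, pvLoopA_eq_fold, List.drop_zero, pvFold_mk,
    compute_category_scores_alt]
  simp [pvMkS, pvCellScan_eq_count]
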